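-- pv_equiv track=rewrite | github.com/triyys/training-python-syntax | syntax/bai48.py | format_even_odd
-- ===== SOURCE A (Python) =====
-- def format_even_odd(arr: list[int]) -> list[int]:
--     even = []
--     odd = []
--     zero = []
--     for element in arr:
--         if element == 0:
--             zero.append(element)
--         elif element % 2 == 0:
--             even.append(element)
--         elif element % 2 == 1:
--             odd.append(element)
--
--     return even + zero + odd
-- ===== SOURCE B (Python) =====
-- def format_even_odd(arr: list[int]) -> list[int]:
--     return sorted(arr, key=lambda x: 1 if x == 0 else (0 if x % 2 == 0 else 2))
-- ===== Notes on version B (the rewrite author's own statement) =====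
-- stated objective: idiomatic
-- what changed: Replaces the three explicit buckets and list appends with a single stable sort keyed by rank (even-nonzero=0, zero=1, odd=2); stability preserves the in-bucket input order.
import Mathlib
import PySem

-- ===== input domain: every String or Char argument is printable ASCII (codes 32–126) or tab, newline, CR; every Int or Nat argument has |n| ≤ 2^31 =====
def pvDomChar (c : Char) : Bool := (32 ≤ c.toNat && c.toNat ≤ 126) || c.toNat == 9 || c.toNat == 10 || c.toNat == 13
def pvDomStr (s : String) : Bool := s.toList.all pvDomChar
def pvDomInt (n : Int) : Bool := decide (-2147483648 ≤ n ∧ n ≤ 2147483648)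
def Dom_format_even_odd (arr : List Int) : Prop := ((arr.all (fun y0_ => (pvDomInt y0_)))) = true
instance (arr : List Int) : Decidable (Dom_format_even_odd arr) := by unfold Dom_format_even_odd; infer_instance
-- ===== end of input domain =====

-- B replaces A's three-bucket loop with one stable sort by rank (even-nonzero=0, zero=1, odd=2); objective: idiomatic, not faster.

-- ===== PORT A =====
def format_even_odd (arr : List Int) : List Int :=
  let s := arr.foldl (fun (s : List Int × List Int × List Int) element =>
      if element == 0 then (s.1, s.2.1 ++ [element], s.2.2)
      else if PySem.Int.mod element 2 == 0 then (s.1 ++ [element], s.2.1, s.2.2)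
      else if PySem.Int.mod element 2 == 1 then (s.1, s.2.1, s.2.2 ++ [element])
      else s) ([], [], [])
  s.1 ++ s.2.1 ++ s.2.2

-- ===== PORT B =====
-- the sort key: 1 if x == 0 else (0 if x % 2 == 0 else 2)
def pvRank (x : Int) : Int :=
  if x == 0 then 1 else if PySem.Int.mod x 2 == 0 then 0 else 2

def format_even_odd_alt (arr : List Int) : List Int :=
  PySem.List.sorted arr pvRank false

-- ===== PRECONDITION & SPEC =====
def Spec_format_even_odd (arr : List Int) (out : List Int) : Prop := out = format_even_odd_alt arr
instance (arr : List Int) (out : List Int) : Decidable (Spec_format_even_odd arr out) := by unfold Spec_format_even_odd; infer_instance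

-- ===== CLAIM (what is proved, stated in full; the proofs are below) =====
def Claim_equal_format_even_odd : Prop := ∀ (arr : List Int), Dom_format_even_odd arr → Spec_format_even_odd arr (format_even_odd arr)

-- ===== LEMMAS AND PROOFS =====

-- the three rank buckets, in order
def pvBucket (r : Int) (l : List Int) : List Int := l.filter (fun x => pvRank x == r)

theorem pvInsertBy_of_forall_before {α : Type} (before : α → α → Bool) (x : α) (l : List α)
    (h : ∀ y ∈ l, before x y = true) : PySem.List.insertBy before x l = x :: l := by
  cases l with
  | nil => rfl
  | cons y ys =>
    simp [PySem.List.insertBy, h y (by simp)]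

theorem pvInsertBy_append {α : Type} (before : α → α → Bool) (x : α) (l1 l2 : List α)
    (h1 : ∀ y ∈ l1, before x y = false) (h2 : ∀ y ∈ l2, before x y = true) :
    PySem.List.insertBy before x (l1 ++ l2) = l1 ++ x :: l2 := by
  induction l1 with
  | nil => simpa using pvInsertBy_of_forall_before before x l2 h2
  | cons y ys ih =>
    rw [List.cons_append,
      show PySem.List.insertBy before x (y :: (ys ++ l2))
          = if before x y then x :: (y :: (ys ++ l2))
            else y :: PySem.List.insertBy before x (ys ++ l2) from rfl,
      h1 y (by simp)]
    simp only [Bool.false_eq_true, if_false]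
    rw [ih (fun a ha => h1 a (by simp [ha]))]
    simp

theorem pvRank_cases (x : Int) : pvRank x = 0 ∨ pvRank x = 1 ∨ pvRank x = 2 := by
  unfold pvRank
  split_ifs <;> simp

-- inserting x into a rank-partitioned accumulator appends it at the end of its bucket
theorem pvFoldl_partition (l a0 a1 a2 : List Int)
    (h0 : ∀ y ∈ a0, pvRank y = 0) (h1 : ∀ y ∈ a1, pvRank y = 1) (h2 : ∀ y ∈ a2, pvRank y = 2) :
    l.foldl (fun acc x => PySem.List.insertBy (fun a b => decide (pvRank a < pvRank b)) x acc)
      (a0 ++ a1 ++ a2)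
    = (a0 ++ pvBucket 0 l) ++ (a1 ++ pvBucket 1 l) ++ (a2 ++ pvBucket 2 l) := by
  induction l generalizing a0 a1 a2 with
  | nil => simp [pvBucket]
  | cons x xs ih =>
    simp only [List.foldl_cons]
    rcases pvRank_cases x with hr | hr | hr
    · have hins : PySem.List.insertBy (fun a b => decide (pvRank a < pvRank b)) x (a0 ++ a1 ++ a2)
          = (a0 ++ [x]) ++ a1 ++ a2 := by
        rw [List.append_assoc]
        rw [pvInsertBy_append _ x a0 (a1 ++ a2)
          (fun y hy => by simp [h0 y hy, hr])
          (fun y hy => by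
            rcases List.mem_append.1 hy with hy | hy
            · simp [h1 y hy, hr]
            · simp [h2 y hy, hr])]
        simp
      rw [hins, ih (a0 ++ [x]) a1 a2
        (fun y hy => by rcases List.mem_append.1 hy with hy | hy
                        · exact h0 y hy
                        · simp at hy; simp [hy, hr]) h1 h2]
      simp [pvBucket, hr, List.filter_cons]
    · have hins : PySem.List.insertBy (fun a b => decide (pvRank a < pvRank b)) x (a0 ++ a1 ++ a2)
          = a0 ++ (a1 ++ [x]) ++ a2 := by
        rw [List.append_assoc, List.append_assoc]
        rw [show a1 ++ a2 = (a1 : List Int) ++ a2 from rfl]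
        rw [← List.append_assoc a0 a1 a2] at *
        rw [pvInsertBy_append _ x (a0 ++ a1) a2
          (fun y hy => by
            rcases List.mem_append.1 hy with hy | hy
            · simp [h0 y hy, hr]
            · simp [h1 y hy, hr])
          (fun y hy => by simp [h2 y hy, hr])]
        simp
      rw [hins, ih a0 (a1 ++ [x]) a2 h0
        (fun y hy => by rcases List.mem_append.1 hy with hy | hy
                        · exact h1 y hy
                        · simp at hy; simp [hy, hr]) h2]
      simp [pvBucket, hr, List.filter_cons]
    · have hins : PySem.List.insertBy (fun a b => decide (pvRank a < pvRank b)) x (a0 ++ a1 ++ a2)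
          = a0 ++ a1 ++ (a2 ++ [x]) := by
        rw [PySem.List.insertBy_of_forall_not_before _ x (a0 ++ a1 ++ a2)
          (fun y hy => by
            rcases List.mem_append.1 hy with hy | hy
            · rcases List.mem_append.1 hy with hy | hy
              · simp [h0 y hy, hr]
              · simp [h1 y hy, hr]
            · simp [h2 y hy, hr])]
        simp
      rw [hins, ih a0 a1 (a2 ++ [x]) h0 h1
        (fun y hy => by rcases List.mem_append.1 hy with hy | hy
                        · exact h2 y hy
                        · simp at hy; simp [hy, hr])]
      simp [pvBucket, hr, List.filter_cons]

theorem pvAlt_eq_buckets (arr : List Int) :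
    format_even_odd_alt arr = pvBucket 0 arr ++ pvBucket 1 arr ++ pvBucket 2 arr := by
  unfold format_even_odd_alt
  rw [PySem.List.sorted_eq_foldl_insertBy]
  simpa using pvFoldl_partition arr [] [] [] (by simp) (by simp) (by simp)

-- A's fold appends each element to the bucket its branch selects
theorem pvA_fold (l e z o : List Int) :
    l.foldl (fun (s : List Int × List Int × List Int) element =>
      if element == 0 then (s.1, s.2.1 ++ [element], s.2.2)
      else if PySem.Int.mod element 2 == 0 then (s.1 ++ [element], s.2.1, s.2.2)
      else if PySem.Int.mod element 2 == 1 then (s.1, s.2.1, s.2.2 ++ [element])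
      else s) (e, z, o)
    = (e ++ pvBucket 0 l, z ++ pvBucket 1 l, o ++ pvBucket 2 l) := by
  induction l generalizing e z o with
  | nil => simp [pvBucket]
  | cons x xs ih =>
    simp only [List.foldl_cons]
    by_cases hx : x = 0
    · rw [if_pos (show (x == 0) = true by simp [hx]), ih]
      simp [pvBucket, pvRank, hx, List.filter_cons]
    · by_cases hm : PySem.Int.mod x 2 = 0
      · have hd : (2 : Int) ∣ x := (PySem.Int.mod_eq_zero_iff_dvd x 2).1 hm
        rw [if_neg (show ¬ (x == 0) = true by simp [hx]),
          if_pos (show (PySem.Int.mod x 2 == 0) = true by simpa using hd), ih]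
        simp [pvBucket, pvRank, hx, hm, hd, List.filter_cons]
      · have hm1 : PySem.Int.mod x 2 = 1 := by
          rcases PySem.Int.mod_two_eq x with h | h
          · exact absurd h hm
          · exact h
        have hd : ¬ (2 : Int) ∣ x := fun h => hm ((PySem.Int.mod_eq_zero_iff_dvd x 2).2 h)
        have he : x % 2 = 1 := by omega
        rw [if_neg (show ¬ (x == 0) = true by simp [hx]),
          if_neg (show ¬ (PySem.Int.mod x 2 == 0) = true by simpa using hd),
          if_pos (show (PySem.Int.mod x 2 == 1) = true by simpa using he), ih]
        simp [pvBucket, pvRank, hx, hm, hd, he, List.filter_cons]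

-- ===== VERDICT (by name: the statement is the Claim_ definition above) =====
theorem format_even_odd_spec : Claim_equal_format_even_odd := by
  intro arr _
  unfold Spec_format_even_odd format_even_odd
  rw [pvAlt_eq_buckets, pvA_fold]
  simp
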